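-- pv_equiv track=rewrite | github.com/yonieq/sambangbansos | AppLogic/stringutil.py | replace_kk
-- ===== SOURCE A (Python) =====
-- def replace_kk(no_kk, start_position, char_length):
--     ep = start_position
--     length = char_length
--     counter = 0
--     new_string = ""
--     for kar in no_kk:
--         if ep <= counter <= ep + length:
--             new_string += "X"
--         else:
--             new_string += kar
--         counter += 1
--
--     return new_string
-- ===== SOURCE B (Python) =====
-- def replace_kk(no_kk, start_position, char_length):
--     lo = max(start_position, 0)
--     hi = min(start_position + char_length, len(no_kk) - 1)
--     if lo > hi:
--         return no_kk
--     return no_kk[:lo] + "X" * (hi - lo + 1) + no_kk[hi + 1:]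
-- ===== Notes on version B (the rewrite author's own statement) =====
-- stated objective: simpler
-- what changed: Replaced the per-character loop with a counter and branch by clamped bound arithmetic and three slice concatenations (prefix + 'X' run + suffix), which also avoids A's repeated string appends.
import Mathlib
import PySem

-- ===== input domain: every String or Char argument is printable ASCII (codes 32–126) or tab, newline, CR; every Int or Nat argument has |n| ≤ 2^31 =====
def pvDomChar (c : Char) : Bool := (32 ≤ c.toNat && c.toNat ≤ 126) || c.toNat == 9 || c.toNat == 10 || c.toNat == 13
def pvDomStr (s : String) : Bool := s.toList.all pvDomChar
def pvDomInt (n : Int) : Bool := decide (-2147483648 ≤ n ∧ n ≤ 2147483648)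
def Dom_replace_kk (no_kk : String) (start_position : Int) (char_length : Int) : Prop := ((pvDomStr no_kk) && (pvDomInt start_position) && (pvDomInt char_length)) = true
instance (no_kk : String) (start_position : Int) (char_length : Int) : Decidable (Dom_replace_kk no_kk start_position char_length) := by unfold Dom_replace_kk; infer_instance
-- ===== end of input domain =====

-- B replaces A's per-character counter loop by clamped bound arithmetic and three slice concatenations; objective: simpler.

-- ===== PORT A =====
-- literal port of A: for-loop over the characters with a counter and a string accumulator
def replace_kk (no_kk : String) (start_position : Int) (char_length : Int) : String :=
  let ep := start_position
  let length := char_length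
  let r := no_kk.toList.foldl
    (fun (st : Int × List Char) kar =>
      (st.1 + 1, st.2 ++ [if ep ≤ st.1 ∧ st.1 ≤ ep + length then 'X' else kar]))
    (0, [])
  String.ofList r.2

-- ===== PORT B =====
-- literal port of Source B: clamped bounds lo/hi, then prefix slice + 'X' run + suffix slice
def replace_kk_alt (no_kk : String) (start_position : Int) (char_length : Int) : String :=
  let lo := max start_position 0
  let hi := min (start_position + char_length) ((no_kk.toList.length : Int) - 1)
  if lo > hi then no_kk
  else String.ofList (PySem.List.slice no_kk.toList none (some lo)
        ++ List.replicate (hi - lo + 1).toNat 'X'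
        ++ PySem.List.slice no_kk.toList (some (hi + 1)) none)

-- ===== PRECONDITION & SPEC =====
def Spec_replace_kk (no_kk : String) (start_position : Int) (char_length : Int) (out : String) : Prop := out = replace_kk_alt no_kk start_position char_length
instance (no_kk : String) (start_position : Int) (char_length : Int) (out : String) : Decidable (Spec_replace_kk no_kk start_position char_length out) := by unfold Spec_replace_kk; infer_instance

-- ===== CLAIM (what is proved, stated in full; the proofs are below) =====
def Claim_equal_replace_kk : Prop := ∀ (no_kk : String) (start_position : Int) (char_length : Int), Dom_replace_kk no_kk start_position char_length → Spec_replace_kk no_kk start_position char_length (replace_kk no_kk start_position char_length)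

-- ===== LEMMAS AND PROOFS =====

-- structural description of A's loop
def pvMask (ep len : Int) : Int → List Char → List Char
  | _, [] => []
  | c, k :: t => (if ep ≤ c ∧ c ≤ ep + len then 'X' else k) :: pvMask ep len (c + 1) t

theorem pvFoldl_eq_mask (ep len : Int) (xs : List Char) :
    ∀ (c : Int) (acc : List Char),
      (xs.foldl (fun (st : Int × List Char) kar =>
        (st.1 + 1, st.2 ++ [if ep ≤ st.1 ∧ st.1 ≤ ep + len then 'X' else kar])) (c, acc)).2
      = acc ++ pvMask ep len c xs := by
  induction xs with
  | nil => intro c acc; simp [pvMask]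
  | cons k t ih =>
      intro c acc
      simp only [List.foldl_cons, pvMask]
      rw [ih]
      simp

theorem pvMask_length (ep len : Int) : ∀ (c : Int) (xs : List Char),
    (pvMask ep len c xs).length = xs.length := by
  intro c xs
  induction xs generalizing c with
  | nil => simp [pvMask]
  | cons k t ih => simp [pvMask, ih]

theorem pvMask_getElem (ep len : Int) : ∀ (xs : List Char) (c : Int) (i : Nat)
    (h : i < xs.length) (h' : i < (pvMask ep len c xs).length),
    (pvMask ep len c xs)[i] =
      if ep ≤ c + i ∧ c + i ≤ ep + len then 'X' else xs[i] := by
  intro xs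
  induction xs with
  | nil => intro c i h; simp at h
  | cons k t ih =>
      intro c i h h'
      cases i with
      | zero => simp [pvMask]
      | succ j =>
          have hj : j < t.length := by simpa using h
          have hj' : j < (pvMask ep len (c + 1) t).length := by
            simpa [pvMask_length] using hj
          simp only [pvMask, List.getElem_cons_succ]
          rw [ih (c + 1) j hj hj']
          have : c + 1 + (j : Int) = c + (j + 1 : Nat) := by push_cast; ring
          rw [this]

theorem replace_kk_eq_mask (no_kk : String) (ep len : Int) :
    replace_kk no_kk ep len = String.ofList (pvMask ep len 0 no_kk.toList) := by
  simp [replace_kk, pvFoldl_eq_mask]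

theorem pvMask_eq_concat (ep len : Int) (xs : List Char)
    (lo hi : Int) (hlo : lo = max ep 0) (hhi : hi = min (ep + len) ((xs.length : Int) - 1))
    (hle : lo ≤ hi) :
    pvMask ep len 0 xs =
      xs.take lo.toNat ++ List.replicate (hi - lo + 1).toNat 'X' ++ xs.drop (hi + 1).toNat := by
  subst hlo hhi
  apply List.ext_getElem
  · simp [pvMask_length]
    omega
  · intro i h1 h2
    rw [pvMask_getElem ep len xs 0 i (by simpa [pvMask_length] using h1) h1]
    have hin : i < xs.length := by simpa [pvMask_length] using h1
    have hlen1 : (List.take (max ep 0).toNat xs).length = (max ep 0).toNat := by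
      simp [List.length_take]; omega
    by_cases hlt : i < (max ep 0).toNat
    · -- prefix
      rw [if_neg (by omega)]
      rw [List.getElem_append_left (by simp [hlen1, List.length_append]; omega),
          List.getElem_append_left (by simp only [hlen1]; omega)]
      simp
    · by_cases hmid : (i : Int) ≤ min (ep + len) ((xs.length : Int) - 1)
      · -- masked middle
        rw [if_pos (by constructor <;> omega)]
        rw [List.getElem_append_left (by simp [hlen1]; omega),
            List.getElem_append_right (by simp only [hlen1]; omega)]
        simp
      · -- suffix
        rw [if_neg (by omega)]
        rw [List.getElem_append_right (by simp [hlen1]; omega)]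
        rw [List.getElem_drop]
        congr 1
        simp [hlen1]
        omega

theorem pvMask_id (ep len : Int) (xs : List Char)
    (h : max ep 0 > min (ep + len) ((xs.length : Int) - 1)) :
    pvMask ep len 0 xs = xs := by
  apply List.ext_getElem
  · simp [pvMask_length]
  · intro i h1 h2
    rw [pvMask_getElem ep len xs 0 i h2 h1]
    rw [if_neg]
    intro hc
    omega

-- ===== VERDICT (by name: the statement is the Claim_ definition above) =====
theorem replace_kk_spec : Claim_equal_replace_kk := by
  intro no_kk ep len _
  unfold Spec_replace_kk replace_kk_alt
  rw [replace_kk_eq_mask]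
  by_cases h : max ep 0 > min (ep + len) ((no_kk.toList.length : Int) - 1)
  · rw [if_pos h, pvMask_id ep len _ h]
    simp
  · have hle : max ep 0 ≤ min (ep + len) ((no_kk.toList.length : Int) - 1) := not_lt.mp h
    have h0 : (0 : Int) ≤ max ep 0 := le_max_right _ _
    have h1 : (0 : Int) ≤ min (ep + len) ((no_kk.toList.length : Int) - 1) + 1 := by omega
    rw [if_neg h,
      pvMask_eq_concat ep len no_kk.toList _ _ rfl rfl hle,
      PySem.List.slice_to _ h0, PySem.List.slice_from _ h1]
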